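-- pv_equiv track=rewrite | github.com/LooKing070/NovellMaker | oldfile/location.py | find_max_rectangles
-- ===== SOURCE A (Python) =====
-- def find_max_rectangles(matrix, mask: tuple):
--     n = len(matrix)
--     m = len(matrix[0]) if n > 0 else 0
--     rectangles = []
--
--     def is_inside(new_rect, existing_rect):
--         return (new_rect[0] >= existing_rect[0] and
--                 new_rect[1] >= existing_rect[1] and
--                 new_rect[2] <= existing_rect[2] and
--                 new_rect[3] <= existing_rect[3])
--
--     for i in range(n):
--         for j in range(m):
--             if matrix[i][j][0] in mask:
--                 start_row, start_col = i, j
--                 bottom_row = start_row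
--                 while bottom_row < n and matrix[bottom_row][j][0] in mask:
--                     bottom_row += 1
--                 bottom_row -= 1
--                 right_col = start_col
--                 while right_col < m and all(matrix[x][right_col][0] in mask for x in range(start_row, bottom_row + 1)):
--                     right_col += 1
--                 right_col -= 1
--
--                 new_rectangle = (start_row, start_col, bottom_row, right_col, mask[0])
--                 if not any(is_inside(new_rectangle, existing) for existing in rectangles):
--                     rectangles.append(new_rectangle)
--     return rectangles  # Найденные прямоугольники (r1, c1, r2, c2, gN)
-- ===== SOURCE B (Python) =====
-- def find_max_rectangles(matrix, mask: tuple):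
--     n = len(matrix)
--     m = len(matrix[0]) if n > 0 else 0
--     # down[i][j] = number of consecutive masked cells downward starting at (i, j)
--     down = [[0] * m for _ in range(n + 1)]
--     for i in range(n - 1, -1, -1):
--         for j in range(m):
--             if matrix[i][j][0] in mask:
--                 down[i][j] = down[i + 1][j] + 1
--     rectangles = []
--     for i in range(n):
--         di = down[i]
--         for j in range(m):
--             h = di[j]
--             if h != 0:
--                 c = j + 1
--                 while c < m and di[c] >= h:
--                     c += 1
--                 rect = (i, j, i + h - 1, c - 1, mask[0])
--                 if not any(rect[0] >= e[0] and rect[1] >= e[1] and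
--                            rect[2] <= e[2] and rect[3] <= e[3] for e in rectangles):
--                     rectangles.append(rect)
--     return rectangles
-- ===== Notes on version B (the rewrite author's own statement) =====
-- stated objective: faster
-- what changed: B precomputes downward masked run-lengths once (bottom-up DP), so each cell's bottom row is read in O(1) and each right-expansion step is a single run-length comparison instead of rescanning the whole column segment.
import Mathlib
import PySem

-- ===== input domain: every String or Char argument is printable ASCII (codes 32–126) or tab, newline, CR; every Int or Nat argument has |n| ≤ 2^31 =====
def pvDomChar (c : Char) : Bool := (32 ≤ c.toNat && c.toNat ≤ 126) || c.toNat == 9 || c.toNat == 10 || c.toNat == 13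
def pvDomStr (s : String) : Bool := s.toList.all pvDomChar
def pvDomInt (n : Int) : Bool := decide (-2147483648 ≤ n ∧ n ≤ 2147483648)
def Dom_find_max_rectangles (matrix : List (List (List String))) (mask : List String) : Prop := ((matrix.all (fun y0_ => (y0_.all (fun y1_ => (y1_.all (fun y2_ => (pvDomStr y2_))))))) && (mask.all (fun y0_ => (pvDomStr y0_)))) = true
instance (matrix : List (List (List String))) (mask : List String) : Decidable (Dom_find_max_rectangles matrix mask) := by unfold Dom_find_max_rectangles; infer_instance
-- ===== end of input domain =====

-- B replaces A's per-cell column rescans by a bottom-up table of downward masked run-lengths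
-- (O(1) bottom row, one run-length comparison per right-expansion step); return values proved equal.

-- ===== PORT A =====
-- matrix[i][j][0]  (indices in range under Pre_)
def pvCell (matrix : List (List (List String))) (i j : Nat) : String :=
  ((matrix.getD i []).getD j []).getD 0 ""

-- matrix[i][j][0] in mask
def pvMasked (matrix : List (List (List String))) (mask : List String) (i j : Nat) : Bool :=
  mask.contains (pvCell matrix i j)

-- is_inside(new_rect, existing_rect)
def pvIsInside (nr er : Int × Int × Int × Int × String) : Bool :=
  decide (nr.1 ≥ er.1) && decide (nr.2.1 ≥ er.2.1) &&
  decide (nr.2.2.1 ≤ er.2.2.1) && decide (nr.2.2.2.1 ≤ er.2.2.2.1)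

-- while bottom_row < n and matrix[bottom_row][j][0] in mask: bottom_row += 1
def pvBottomLoop (matrix : List (List (List String))) (mask : List String) (n j br : Nat) : Nat :=
  if h : br < n ∧ pvMasked matrix mask br j = true then
    pvBottomLoop matrix mask n j (br + 1)
  else br
termination_by n - br
decreasing_by omega

-- while right_col < m and all(matrix[x][right_col][0] in mask for x in range(start_row, bottom_row+1)): right_col += 1
def pvRightLoop (matrix : List (List (List String))) (mask : List String) (m i bottom rc : Nat) : Nat :=
  if h : rc < m ∧ ((List.range' i (bottom + 1 - i)).all (fun x => pvMasked matrix mask x rc)) = true then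
    pvRightLoop matrix mask m i bottom (rc + 1)
  else rc
termination_by m - rc
decreasing_by omega

def find_max_rectangles (matrix : List (List (List String))) (mask : List String) : List (Int × Int × Int × Int × String) :=
  let n := matrix.length
  let m := if n > 0 then (matrix.headD []).length else 0
  (List.range n).foldl (fun rects i =>
    (List.range m).foldl (fun rects j =>
      if pvMasked matrix mask i j then
        let bottom := pvBottomLoop matrix mask n j i - 1
        let right := pvRightLoop matrix mask m i bottom j - 1
        let newRect : Int × Int × Int × Int × String :=
          ((i : Int), (j : Int), (bottom : Int), (right : Int), mask.getD 0 "")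
        if rects.any (fun e => pvIsInside newRect e) then rects else rects ++ [newRect]
      else rects) rects) []

-- ===== PORT B =====
-- one row of B's `down` table, computed from the row below it
def pvDownRow (matrix : List (List (List String))) (mask : List String) (m i : Nat) (prev : List Nat) : List Nat :=
  (List.range m).map (fun j => if pvMasked matrix mask i j then prev.getD j 0 + 1 else 0)

-- B's bottom-up loop filling rows i, i+1, …, n-1 plus the all-zero sentinel row n
def pvBuildDown (matrix : List (List (List String))) (mask : List String) (m n i : Nat) : List (List Nat) :=
  if h : i < n then
    let rest := pvBuildDown matrix mask m n (i + 1)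
    pvDownRow matrix mask m i (rest.headD []) :: rest
  else [List.replicate m 0]
termination_by n - i
decreasing_by omega

-- while c < m and di[c] >= h: c += 1
def pvAltRight (di : List Nat) (m hgt c : Nat) : Nat :=
  if h : c < m ∧ di.getD c 0 ≥ hgt then pvAltRight di m hgt (c + 1) else c
termination_by m - c
decreasing_by omega

def find_max_rectangles_alt (matrix : List (List (List String))) (mask : List String) : List (Int × Int × Int × Int × String) :=
  let n := matrix.length
  let m := if n > 0 then (matrix.headD []).length else 0
  let down := pvBuildDown matrix mask m n 0
  (List.range n).foldl (fun rects i =>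
    let di := down.getD i []
    (List.range m).foldl (fun rects j =>
      let hgt := di.getD j 0
      if hgt ≠ 0 then
        let c := pvAltRight di m hgt (j + 1)
        let newRect : Int × Int × Int × Int × String :=
          ((i : Int), (j : Int), ((i + hgt - 1 : Nat) : Int), ((c - 1 : Nat) : Int), mask.getD 0 "")
        if rects.any (fun e => pvIsInside newRect e) then rects else rects ++ [newRect]
      else rects) rects) []

-- ===== PRECONDITION & SPEC =====
-- Pre_ excludes exactly the inputs on which Python A raises IndexError: a row shorter than the
-- first row, or an empty cell list in one of the first len(matrix[0]) columns of some row.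
def Pre_find_max_rectangles (matrix : List (List (List String))) (mask : List String) : Prop :=
  ∀ row ∈ matrix, (matrix.headD []).length ≤ row.length ∧
    ∀ cell ∈ row.take (matrix.headD []).length, cell ≠ []

instance (matrix : List (List (List String))) (mask : List String) : Decidable (Pre_find_max_rectangles matrix mask) := by
  unfold Pre_find_max_rectangles; infer_instance

def pvWitness_find_max_rectangles : List (List (List String)) × List String :=
  ([[["a"], ["b"]], [["a"], ["a"]]], ["a"])

def Spec_find_max_rectangles (matrix : List (List (List String))) (mask : List String) (out : List (Int × Int × Int × Int × String)) : Prop := out = find_max_rectangles_alt matrix mask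
instance (matrix : List (List (List String))) (mask : List String) (out : List (Int × Int × Int × Int × String)) : Decidable (Spec_find_max_rectangles matrix mask out) := by unfold Spec_find_max_rectangles; infer_instance

-- ===== CLAIM (what is proved, stated in full; the proofs are below) =====
def Claim_equal_find_max_rectangles : Prop := ∀ (matrix : List (List (List String))) (mask : List String), Dom_find_max_rectangles matrix mask → Pre_find_max_rectangles matrix mask → Spec_find_max_rectangles matrix mask (find_max_rectangles matrix mask)

-- ===== LEMMAS AND PROOFS =====

-- proof-side view of the `down` table: downward masked run length from (i, j)
def pvDownVal (matrix : List (List (List String))) (mask : List String) (n i j : Nat) : Nat :=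
  if h : i < n ∧ pvMasked matrix mask i j = true then pvDownVal matrix mask n (i + 1) j + 1 else 0
termination_by n - i
decreasing_by omega

theorem pvDownVal_le (matrix : List (List (List String))) (mask : List String) (n : Nat) :
    ∀ i j, pvDownVal matrix mask n i j ≤ n - i := by
  have H : ∀ k i j, n - i = k → pvDownVal matrix mask n i j ≤ n - i := by
    intro k
    induction k with
    | zero =>
      intro i j hk
      rw [pvDownVal, dif_neg (fun hc => absurd hc.1 (by omega))]
      omega
    | succ k ih =>
      intro i j hk
      by_cases hc : i < n ∧ pvMasked matrix mask i j = true
      · rw [pvDownVal, dif_pos hc]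
        have := ih (i + 1) j (by omega)
        omega
      · rw [pvDownVal, dif_neg hc]; omega
  exact fun i j => H (n - i) i j rfl

theorem pvBottomLoop_eq (matrix : List (List (List String))) (mask : List String) (n j : Nat) :
    ∀ br, pvBottomLoop matrix mask n j br = br + pvDownVal matrix mask n br j := by
  have H : ∀ k br, n - br = k → pvBottomLoop matrix mask n j br = br + pvDownVal matrix mask n br j := by
    intro k
    induction k with
    | zero =>
      intro br hk
      rw [pvBottomLoop, pvDownVal, dif_neg (fun hc => absurd hc.1 (by omega)),
        dif_neg (fun hc => absurd hc.1 (by omega))]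
      omega
    | succ k ih =>
      intro br hk
      by_cases hc : br < n ∧ pvMasked matrix mask br j = true
      · rw [pvBottomLoop, pvDownVal, dif_pos hc, dif_pos hc, ih (br + 1) (by omega)]
        omega
      · rw [pvBottomLoop, pvDownVal, dif_neg hc, dif_neg hc]; omega
  exact fun br => H (n - br) br rfl

theorem all_range'_iff (matrix : List (List (List String))) (mask : List String) (n c : Nat) :
    ∀ k i, i + k ≤ n →
      (((List.range' i k).all (fun x => pvMasked matrix mask x c)) = true ↔
        k ≤ pvDownVal matrix mask n i c) := by
  intro k
  induction k with
  | zero => intro i _; simp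
  | succ k ih =>
    intro i hnk
    have hi : i < n := by omega
    rw [List.range'_succ, List.all_cons, pvDownVal]
    by_cases hm : pvMasked matrix mask i c = true
    · rw [dif_pos ⟨hi, hm⟩, Bool.and_eq_true, hm]
      have := ih (i + 1) (by omega)
      constructor
      · intro h; have := this.mp h.2; omega
      · intro h; exact ⟨rfl, this.mpr (by omega)⟩
    · rw [dif_neg (fun hc => hm hc.2)]
      simp [hm]

theorem pvRightLoop_eq (matrix : List (List (List String))) (mask : List String)
    (n m i hgt : Nat) (di : List Nat) (hh : 1 ≤ hgt) (hn : i + hgt ≤ n)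
    (hdi : ∀ c, c < m → di.getD c 0 = pvDownVal matrix mask n i c) :
    ∀ rc, pvRightLoop matrix mask m i (i + hgt - 1) rc = pvAltRight di m hgt rc := by
  have hlen : i + hgt - 1 + 1 - i = hgt := by omega
  have H : ∀ k rc, m - rc = k →
      pvRightLoop matrix mask m i (i + hgt - 1) rc = pvAltRight di m hgt rc := by
    intro k
    induction k with
    | zero =>
      intro rc hk
      rw [pvRightLoop, pvAltRight, dif_neg (fun hc => absurd hc.1 (by omega)),
        dif_neg (fun hc => absurd hc.1 (by omega))]
    | succ k ih =>
      intro rc hk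
      by_cases hrc : rc < m
      · have hcond : ((List.range' i (i + hgt - 1 + 1 - i)).all
            (fun x => pvMasked matrix mask x rc)) = true ↔ hgt ≤ di.getD rc 0 := by
          rw [hlen, all_range'_iff matrix mask n rc hgt i hn, hdi rc hrc]
        by_cases hA : hgt ≤ di.getD rc 0
        · rw [pvRightLoop, pvAltRight, dif_pos ⟨hrc, hcond.mpr hA⟩, dif_pos ⟨hrc, hA⟩,
            ih (rc + 1) (by omega)]
        · rw [pvRightLoop, pvAltRight, dif_neg (fun hc => hA (hcond.mp hc.2)),
            dif_neg (fun hc => hA hc.2)]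
      · rw [pvRightLoop, pvAltRight, dif_neg (fun hc => hrc hc.1),
          dif_neg (fun hc => hrc hc.1)]
  exact fun rc => H (m - rc) rc rfl

theorem pvDownRow_getD (matrix : List (List (List String))) (mask : List String)
    (m i j : Nat) (prev : List Nat) (hj : j < m) :
    (pvDownRow matrix mask m i prev).getD j 0 =
      if pvMasked matrix mask i j then prev.getD j 0 + 1 else 0 := by
  simp [pvDownRow, List.getD_eq_getElem?_getD, hj]

theorem pvBuildDown_headD_getD (matrix : List (List (List String))) (mask : List String) (m n : Nat) :
    ∀ i j, j < m →
      ((pvBuildDown matrix mask m n i).headD []).getD j 0 = pvDownVal matrix mask n i j := by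
  have H : ∀ k i, n - i = k → ∀ j, j < m →
      ((pvBuildDown matrix mask m n i).headD []).getD j 0 = pvDownVal matrix mask n i j := by
    intro k
    induction k with
    | zero =>
      intro i hk j hj
      rw [pvBuildDown, dif_neg (by omega), pvDownVal, dif_neg (fun hc => absurd hc.1 (by omega))]
      simp [List.getD_eq_getElem?_getD, hj]
    | succ k ih =>
      intro i hk j hj
      by_cases hi : i < n
      · rw [pvBuildDown, dif_pos hi]
        show (pvDownRow matrix mask m i ((pvBuildDown matrix mask m n (i + 1)).headD [])).getD j 0 = _
        rw [pvDownRow_getD matrix mask m i j _ hj, ih (i + 1) (by omega) j hj]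
        by_cases hm : pvMasked matrix mask i j = true
        · rw [if_pos hm]
          conv_rhs => rw [pvDownVal]
          rw [dif_pos ⟨hi, hm⟩]
        · rw [if_neg hm]
          conv_rhs => rw [pvDownVal]
          rw [dif_neg (fun hc => hm hc.2)]
      · rw [pvBuildDown, dif_neg hi, pvDownVal, dif_neg (fun hc => hi hc.1)]
        simp [List.getD_eq_getElem?_getD, hj]
  exact fun i j hj => H (n - i) i rfl j hj

theorem pvGetD_zero_headD {α : Type} (l : List α) (d : α) : l.getD 0 d = l.headD d := by
  cases l <;> rfl

theorem pvBuildDown_getD (matrix : List (List (List String))) (mask : List String) (m n : Nat) :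
    ∀ k i, i + k ≤ n →
      (pvBuildDown matrix mask m n i).getD k [] = (pvBuildDown matrix mask m n (i + k)).headD [] := by
  intro k
  induction k with
  | zero =>
    intro i _
    simp only [Nat.add_zero]
    exact pvGetD_zero_headD _ _
  | succ k ih =>
    intro i hik
    have hsum : i + (k + 1) = i + 1 + k := by omega
    rw [hsum, pvBuildDown, dif_pos (by omega)]
    show (pvBuildDown matrix mask m n (i + 1)).getD k [] = _
    exact ih (i + 1) (by omega)

theorem find_max_rectangles_eq (matrix : List (List (List String))) (mask : List String) :
    find_max_rectangles matrix mask = find_max_rectangles_alt matrix mask := by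
  unfold find_max_rectangles find_max_rectangles_alt
  dsimp only
  apply PySem.List.foldl_congr_mem'
  intro i hi acc
  apply PySem.List.foldl_congr_mem'
  intro j hj rects
  rw [List.mem_range] at hi hj
  set n := matrix.length with hn
  set m := (if n > 0 then (matrix.headD []).length else 0) with hm
  set di := (pvBuildDown matrix mask m n 0).getD i [] with hdiv
  have hdiAll : ∀ c, c < m → di.getD c 0 = pvDownVal matrix mask n i c := by
    intro c hc
    rw [hdiv, pvBuildDown_getD matrix mask m n i 0 (by omega), Nat.zero_add,
      pvBuildDown_headD_getD matrix mask m n i c hc]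
  by_cases hmk : pvMasked matrix mask i j = true
  · have hd : di.getD j 0 = pvDownVal matrix mask n i j := hdiAll j hj
    set d := pvDownVal matrix mask n i j with hdd
    have hdpos : d ≠ 0 := by
      rw [hdd, pvDownVal, dif_pos ⟨hi, hmk⟩]
      exact Nat.succ_ne_zero _
    have hin : i + d ≤ n := by
      have := pvDownVal_le matrix mask n i j
      omega
    have hbot : pvBottomLoop matrix mask n j i = i + d := by
      rw [hdd]; exact pvBottomLoop_eq matrix mask n j i
    have hfirst : pvRightLoop matrix mask m i (i + d - 1) j = pvAltRight di m d (j + 1) := by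
      rw [pvRightLoop]
      have hlen : i + d - 1 + 1 - i = d := by omega
      rw [hlen]
      have hall : ((List.range' i d).all fun x => pvMasked matrix mask x j) = true :=
        (all_range'_iff matrix mask n j d i hin).mpr (le_of_eq hdd)
      rw [dif_pos ⟨hj, hall⟩]
      exact pvRightLoop_eq matrix mask n m i d di (by omega) hin hdiAll (j + 1)
    rw [if_pos hmk, hbot, hfirst, hd, if_pos hdpos]
  · have hz : pvDownVal matrix mask n i j = 0 := by
      rw [pvDownVal, dif_neg (fun hc => hmk hc.2)]
    rw [if_neg hmk, hdiAll j hj, hz]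
    simp

-- ===== VERDICT (by name: the statement is the Claim_ definition above) =====
theorem find_max_rectangles_spec : Claim_equal_find_max_rectangles := by
  intro matrix mask _ _
  unfold Spec_find_max_rectangles
  exact find_max_rectangles_eq matrix mask
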